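-- pv_equiv track=rewrite | github.com/meithan/AoC17 | day21.py | split_subgrids
-- ===== SOURCE A (Python) =====
-- def isqrt(n):
--   x = n
--   y = (x + 1) // 2
--   while y < x:
--     x = y
--     y = (x + n // x) // 2
--   return x
--
-- def split_subgrids(grid):
--
--   size = isqrt(len(grid))
--   subgrids = []
--
--   if size % 2 == 0:
--     div = size // 2
--     for j in range(div):
--       for i in range(div):
--         k0 = 2*size*j + 2*i
--         subgrid = grid[k0] + grid[k0+1] + \
--                   grid[k0+size] + grid[k0+size+1]
--         subgrids.append(subgrid)
--
--   elif size % 3 == 0: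
--     div = size // 3
--     for j in range(div):
--       for i in range(div):
--         k0 = 3*size*j + 3*i
--         subgrid = grid[k0] + grid[k0+1] + grid[k0+2] + \
--                   grid[k0+size] + grid[k0+size+1] + grid[k0+size+2] + \
--                   grid[k0+2*size] + grid[k0+2*size+1] + grid[k0+2*size+2]
--         subgrids.append(subgrid)
--
--   return subgrids
-- ===== SOURCE B (Python) =====
-- def _gather(grid, size, b):
--     # one linear pass: route every cell to its block's bucket by index arithmetic
--     d = size // b
--     buckets = [""] * (d * d)
--     for k in range(size * size):
--         r, c = divmod(k, size)
--         buckets[(r // b) * d + (c // b)] += grid[k]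
--     return buckets
--
-- def split_subgrids(grid):
--     n = len(grid)
--     size = 0
--     while (size + 1) * (size + 1) <= n:
--         size += 1
--     if size % 2 == 0:
--         return _gather(grid, size, 2)
--     if size % 3 == 0:
--         return _gather(grid, size, 3)
--     return []
-- ===== Notes on version B (the rewrite author's own statement) =====
-- stated objective: alternative
-- what changed: Replaces A's Newton isqrt plus nested block loops (which jump around the grid gathering each subgrid's cells with hand-computed k0 offsets) by a counting square root and a single linear scan over all cells that routes each cell into its block's bucket via (r//b)*d + c//b, accumulating every subgrid simultaneously.
import Mathlib
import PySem

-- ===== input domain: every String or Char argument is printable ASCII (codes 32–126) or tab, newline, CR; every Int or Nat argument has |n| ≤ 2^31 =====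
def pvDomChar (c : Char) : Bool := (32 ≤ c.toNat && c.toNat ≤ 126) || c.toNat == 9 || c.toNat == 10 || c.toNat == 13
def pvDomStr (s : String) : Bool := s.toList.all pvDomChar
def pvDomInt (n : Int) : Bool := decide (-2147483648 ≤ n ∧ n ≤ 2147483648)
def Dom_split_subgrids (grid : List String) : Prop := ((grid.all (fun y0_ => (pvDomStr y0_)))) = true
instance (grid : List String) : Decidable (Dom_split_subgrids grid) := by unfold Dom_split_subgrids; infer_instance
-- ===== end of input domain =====

-- B replaces A's per-block gathering (nested block loops with flat k0-offset arithmetic,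
-- after a Newton-iteration isqrt) by one linear scan over all cells that routes each cell
-- into its block's bucket; same cost, different algorithm (objective: alternative).

-- ===== PORT A =====

-- termination helper (cited in decreasing_by of isqrtGo and sizeLoopB): t ≤ t*t
theorem pv_self_le_mul_self (t : Int) : t ≤ t * t := by nlinarith [mul_self_nonneg t, mul_self_nonneg (t - 1)]

-- Python's loop guard is just 'y < x'; the extra '0 ≤ y' (which holds invariantly for the
-- only reachable arguments n = len(grid) ≥ 0, see pv_newton below) makes termination evident.
def isqrtGo (n x y : Int) : Int :=
  if _h : y < x ∧ 0 ≤ y then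
    isqrtGo n y (PySem.Int.floordiv (y + PySem.Int.floordiv n y) 2)
  else x
termination_by x.toNat
decreasing_by omega

def isqrt (n : Int) : Int := isqrtGo n n (PySem.Int.floordiv (n + 1) 2)

-- grid[k] is always in range here (size*size ≤ len grid, proved below), so pyGetD's
-- default "" is unreachable; Python raises only off this path.
def split_subgrids (grid : List String) : List String :=
  let size := isqrt (grid.length : Int)
  if PySem.Int.mod size 2 = 0 then
    let d := PySem.Int.floordiv size 2
    (PySem.List.pyRange 0 d 1).foldl (fun subgrids j =>
      (PySem.List.pyRange 0 d 1).foldl (fun subgrids i =>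
        let k0 := 2 * size * j + 2 * i
        subgrids ++ [PySem.List.pyGetD grid k0 "" ++ PySem.List.pyGetD grid (k0 + 1) "" ++
                     PySem.List.pyGetD grid (k0 + size) "" ++ PySem.List.pyGetD grid (k0 + size + 1) ""]) subgrids) []
  else if PySem.Int.mod size 3 = 0 then
    let d := PySem.Int.floordiv size 3
    (PySem.List.pyRange 0 d 1).foldl (fun subgrids j =>
      (PySem.List.pyRange 0 d 1).foldl (fun subgrids i =>
        let k0 := 3 * size * j + 3 * i
        subgrids ++ [PySem.List.pyGetD grid k0 "" ++ PySem.List.pyGetD grid (k0 + 1) "" ++ PySem.List.pyGetD grid (k0 + 2) "" ++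
                     PySem.List.pyGetD grid (k0 + size) "" ++ PySem.List.pyGetD grid (k0 + size + 1) "" ++ PySem.List.pyGetD grid (k0 + size + 2) "" ++
                     PySem.List.pyGetD grid (k0 + 2 * size) "" ++ PySem.List.pyGetD grid (k0 + 2 * size + 1) "" ++ PySem.List.pyGetD grid (k0 + 2 * size + 2) ""]) subgrids) []
  else []

-- ===== PORT B =====

-- while (size+1)*(size+1) <= n: size += 1
def sizeLoopB (n s : Int) : Int :=
  if (s + 1) * (s + 1) ≤ n then sizeLoopB n (s + 1) else s
termination_by (n - s).toNat
decreasing_by have := pv_self_le_mul_self (s + 1); exact (by omega)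

-- _gather(grid, size, b): buckets = [""]*(d*d) (d*d ≥ 0, so the replicate count is exact);
-- buckets[idx] += grid[k] via pySetD/pyGetD (idx is always in range on this path).
def pvGather (grid : List String) (size b : Int) : List String :=
  let d := PySem.Int.floordiv size b
  (PySem.List.pyRange 0 (size * size) 1).foldl (fun buckets k =>
    let r := PySem.Int.floordiv k size
    let c := PySem.Int.mod k size
    let idx := PySem.Int.floordiv r b * d + PySem.Int.floordiv c b
    PySem.List.pySetD buckets idx
      (PySem.List.pyGetD buckets idx "" ++ PySem.List.pyGetD grid k ""))
    (List.replicate (d * d).toNat "")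

def split_subgrids_alt (grid : List String) : List String :=
  let size := sizeLoopB (grid.length : Int) 0
  if PySem.Int.mod size 2 = 0 then pvGather grid size 2
  else if PySem.Int.mod size 3 = 0 then pvGather grid size 3
  else []

-- ===== PRECONDITION & SPEC =====
def Spec_split_subgrids (grid : List String) (out : List String) : Prop := out = split_subgrids_alt grid
instance (grid : List String) (out : List String) : Decidable (Spec_split_subgrids grid out) := by unfold Spec_split_subgrids; infer_instance

-- ===== CLAIM (what is proved, stated in full; the proofs are below) =====
def Claim_equal_split_subgrids : Prop := ∀ (grid : List String), Dom_split_subgrids grid → Spec_split_subgrids grid (split_subgrids grid)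

-- ===== LEMMAS AND PROOFS =====

-- B's counting loop returns the floor square root (characterisation)
theorem pv_sizeLoop_char (n : Int) (m : Nat) : ∀ s : Int, (n - s).toNat ≤ m → 0 ≤ s → s * s ≤ n →
    0 ≤ sizeLoopB n s ∧ sizeLoopB n s * sizeLoopB n s ≤ n ∧ n < (sizeLoopB n s + 1) * (sizeLoopB n s + 1) := by
  induction m with
  | zero =>
    intro s hm h0 h1
    rw [sizeLoopB]
    split
    · rename_i hg
      have := pv_self_le_mul_self (s + 1)
      omega
    · rename_i hg
      exact ⟨h0, h1, by omega⟩
  | succ m ih =>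
    intro s hm h0 h1
    rw [sizeLoopB]
    split
    · rename_i hg
      have h' := pv_self_le_mul_self (s + 1)
      exact ih (s + 1) (by omega) (by omega) hg
    · rename_i hg
      exact ⟨h0, h1, by omega⟩

-- integer AM–GM step: the Newton iterate never falls below the floor square root
theorem pv_amgm (n x s : Int) (hx : 1 ≤ x) (h1 : s * s ≤ n) :
    s ≤ PySem.Int.floordiv (x + PySem.Int.floordiv n x) 2 := by
  have hn : 0 ≤ n := le_trans (mul_self_nonneg s) h1
  have hdnn : 0 ≤ PySem.Int.floordiv n x := by
    rw [PySem.Int.le_floordiv_iff_mul_le (by omega)]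
    simpa using hn
  rw [PySem.Int.le_floordiv_iff_mul_le (by omega : (0:Int) < 2)]
  by_cases hc : 2 * s - x ≤ 0
  · omega
  · have hkey : (2 * s - x) * x ≤ n := by nlinarith [mul_self_nonneg (s - x)]
    have : 2 * s - x ≤ PySem.Int.floordiv n x := by
      rw [PySem.Int.le_floordiv_iff_mul_le (by omega)]
      exact hkey
    omega

-- Newton's loop, once in its steady shape, returns exactly the floor square root s
theorem pv_newton (n s : Int) (hs1 : 1 ≤ s) (hsq : s * s ≤ n) (hlt : n < (s + 1) * (s + 1))
    (m : Nat) : ∀ x : Int, x.toNat ≤ m → 1 ≤ x → s ≤ x →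
    isqrtGo n x (PySem.Int.floordiv (x + PySem.Int.floordiv n x) 2) = s := by
  induction m with
  | zero => intro x hx1 hx2 hx3; omega
  | succ m ih =>
    intro x hxm hx1 hsx
    have hn : 0 ≤ n := le_trans (mul_self_nonneg s) hsq
    set y := PySem.Int.floordiv (x + PySem.Int.floordiv n x) 2 with hy
    have hsy : s ≤ y := pv_amgm n x s hx1 hsq
    have hy0 : 0 ≤ y := by omega
    rw [isqrtGo]
    split
    · rename_i hg
      exact ih y (by omega) (by omega) hsy
    · rename_i hg
      have hxy : x ≤ y := by omega
      have h2 : x * 2 ≤ x + PySem.Int.floordiv n x := by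
        rw [hy, PySem.Int.le_floordiv_iff_mul_le (by omega : (0:Int) < 2)] at hxy
        exact hxy
      have h3 : x ≤ PySem.Int.floordiv n x := by omega
      have h4 : x * x ≤ n := by
        rw [PySem.Int.le_floordiv_iff_mul_le (by omega)] at h3
        exact h3
      have h5 : x ≤ s := by nlinarith
      omega

-- A's isqrt equals B's counting loop on n ≥ 0
theorem pv_isqrt_eq (n : Int) (hn : 0 ≤ n) : isqrt n = sizeLoopB n 0 := by
  obtain ⟨h0s, h1s, h2s⟩ := pv_sizeLoop_char n n.toNat 0 (by omega) (by omega) (by simpa using hn)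
  set s := sizeLoopB n 0 with hs
  by_cases hsmall : n ≤ 1
  · interval_cases n
    · have : s = 0 := by
        rw [hs, sizeLoopB]; norm_num
      rw [this, isqrt, isqrtGo]
      norm_num [PySem.Int.floordiv_eq_ediv_of_pos]
    · have : s = 1 := by
        rw [hs, sizeLoopB, sizeLoopB]; norm_num
      rw [this, isqrt, isqrtGo]
      norm_num [PySem.Int.floordiv_eq_ediv_of_pos]
  · have hn2 : 2 ≤ n := by omega
    have hs1 : 1 ≤ s := by
      by_contra h
      have : s = 0 := by omega
      rw [this] at h2s; omega
    set y0 := PySem.Int.floordiv (n + 1) 2 with hy0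
    have hy0lt : y0 < n := by
      rw [hy0, PySem.Int.floordiv_lt_iff_lt_mul (by omega : (0:Int) < 2)]
      omega
    have hsy0 : s ≤ y0 := by
      rw [hy0, PySem.Int.le_floordiv_iff_mul_le (by omega : (0:Int) < 2)]
      nlinarith [mul_self_nonneg (s - 1)]
    have hy00 : 0 ≤ y0 := by omega
    rw [isqrt, isqrtGo]
    rw [dif_pos ⟨hy0lt, hy00⟩]
    exact pv_newton n s hs1 h1s h2s y0.toNat y0 (by omega) (by omega) hsy0

-- concatenation of the cells named by an index list (left-to-right)
def pvW (G : Int → String) : List Int → String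
  | [] => ""
  | k :: ks => G k ++ pvW G ks

-- the bucket fold keeps the list length
theorem pv_bucket_len (F : Int → Int) (G : Int → String) : ∀ (ks : List Int) (bs : List String),
    (ks.foldl (fun bs k => PySem.List.pySetD bs (F k) (PySem.List.pyGetD bs (F k) "" ++ G k)) bs).length = bs.length := by
  intro ks
  induction ks with
  | nil => intro bs; rfl
  | cons k ks ih => intro bs; rw [List.foldl_cons, ih, PySem.List.length_pySetD]

-- bucket t of the fold = its initial content ++ the cells routed to t, in scan order
theorem pv_bucket_get (F : Int → Int) (G : Int → String) :
    ∀ (ks : List Int) (bs : List String) (t : Nat), t < bs.length → (∀ k ∈ ks, 0 ≤ F k) →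
    (ks.foldl (fun bs k => PySem.List.pySetD bs (F k) (PySem.List.pyGetD bs (F k) "" ++ G k)) bs).getD t "" =
      bs.getD t "" ++ pvW G (ks.filter (fun k => F k == (t : Int))) := by
  intro ks
  induction ks with
  | nil => intro bs t ht _; simp [pvW]
  | cons k ks ih =>
    intro bs t ht hF
    have hk0 : 0 ≤ F k := hF k (by simp)
    rw [List.foldl_cons, List.filter_cons]
    have hlen : (PySem.List.pySetD bs (F k) (PySem.List.pyGetD bs (F k) "" ++ G k)).length = bs.length :=
      PySem.List.length_pySetD _ _ _
    rw [ih _ t (by rw [hlen]; exact ht) (fun k' hk' => hF k' (List.mem_cons_of_mem _ hk'))]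
    by_cases hkt : F k = (t : Int)
    · rw [if_pos (by simp [hkt])]
      rw [PySem.List.pySetD_of_nonneg _ _ hk0, PySem.List.pyGetD_of_nonneg _ _ hk0]
      have htn : (F k).toNat = t := by omega
      rw [htn, List.getD_eq_getElem?_getD, List.getElem?_set_self ht, Option.getD_some, pvW]
      exact String.append_assoc
    · rw [if_neg (by simp [hkt])]
      rw [PySem.List.pySetD_of_nonneg _ _ hk0]
      have htn : (F k).toNat ≠ t := by omega
      rw [List.getD_eq_getElem?_getD, List.getElem?_set_ne htn, ← List.getD_eq_getElem?_getD]

-- a square range of indices, split into its rows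
theorem pv_grid_decomp_aux (s : Int) (hs : 0 ≤ s) : ∀ (m : Nat),
    PySem.List.pyRange 0 ((m : Int) * s) 1 =
      (PySem.List.pyRange 0 (m : Int) 1).flatMap (fun r => (PySem.List.pyRange 0 s 1).map (fun c => r * s + c)) := by
  intro m
  induction m with
  | zero => simp [PySem.List.pyRange_one_eq_nil]
  | succ m ih =>
    have hcast : ((m + 1 : Nat) : Int) = (m : Int) + 1 := by push_cast; ring
    rw [hcast]
    have h1 : (0 : Int) ≤ (m : Int) * s := by positivity
    have h2 : (m : Int) * s ≤ ((m : Int) + 1) * s := by nlinarith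
    rw [PySem.List.pyRange_one_append 0 ((m : Int) * s) (((m : Int) + 1) * s) h1 h2, ih,
        PySem.List.pyRange_one_succ_right (by positivity), List.flatMap_append]
    congr 1
    simp only [List.flatMap_cons, List.flatMap_nil, List.append_nil]
    rw [PySem.List.pyRange_one ((m : Int) * s) (((m : Int) + 1) * s), PySem.List.pyRange_one 0 s,
        List.map_map]
    have h3 : ((m : Int) + 1) * s - (m : Int) * s = s := by ring
    rw [h3, show s - (0 : Int) = s by ring]
    apply List.map_congr_left
    intro k _
    simp

theorem pv_grid_decomp (s : Int) (hs : 0 ≤ s) :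
    PySem.List.pyRange 0 (s * s) 1 =
      (PySem.List.pyRange 0 s 1).flatMap (fun r => (PySem.List.pyRange 0 s 1).map (fun c => r * s + c)) := by
  obtain ⟨m, rfl⟩ : ∃ m : Nat, s = (m : Int) := ⟨s.toNat, by omega⟩
  exact pv_grid_decomp_aux _ hs m

-- row/column decomposition of a flat index is unique
theorem pv_div_row (s r c : Int) (hs : 0 < s) (hc0 : 0 ≤ c) (hcs : c < s) :
    PySem.Int.floordiv (r * s + c) s = r ∧ PySem.Int.mod (r * s + c) s = c := by
  have h1 : PySem.Int.floordiv (r * s + c) s = r :=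
    (PySem.Int.floordiv_eq_iff_of_pos hs).mpr ⟨by nlinarith, by nlinarith⟩
  refine ⟨h1, ?_⟩
  have h2 := PySem.Int.floordiv_mul_add_mod (r * s + c) s
  rw [h1] at h2
  linarith

-- base-d decomposition of a bucket number is unique
theorem pv_qd_unique {d J I J' I' : Int} (hI0 : 0 ≤ I) (hId : I < d) (hI0' : 0 ≤ I') (hId' : I' < d)
    (h : J' * d + I' = J * d + I) : J' = J ∧ I' = I := by
  rcases lt_trichotomy J' J with h1 | h1 | h1
  · exfalso
    have := mul_le_mul_of_nonneg_right (show J' + 1 ≤ J by omega) (show (0:Int) ≤ d by omega)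
    linarith
  · refine ⟨h1, ?_⟩
    subst h1
    linarith
  · exfalso
    have := mul_le_mul_of_nonneg_right (show J + 1 ≤ J' by omega) (show (0:Int) ≤ d by omega)
    linarith

-- the columns routed to block column I are exactly [b*I, b*I+b)
theorem pv_filter_interval (s b d I : Int) (hb : 0 < b) (hI0 : 0 ≤ I) (hId : I < d) (hs : s = b * d) :
    (PySem.List.pyRange 0 s 1).filter (fun c => PySem.Int.floordiv c b == I) =
      PySem.List.pyRange (b * I) (b * I + b) 1 := by
  have hbI0 : (0 : Int) ≤ b * I := by positivity
  have hupper : b * I + b ≤ s := by nlinarith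
  rw [PySem.List.pyRange_one_append 0 (b * I) s hbI0 (by omega),
      PySem.List.pyRange_one_append (b * I) (b * I + b) s (by omega) hupper,
      List.filter_append, List.filter_append]
  have e1 : (PySem.List.pyRange 0 (b * I) 1).filter (fun c => PySem.Int.floordiv c b == I) = [] := by
    rw [List.filter_eq_nil_iff]
    intro c hc
    obtain ⟨hc0, hcI⟩ := PySem.List.mem_pyRange_one.mp hc
    simp only [beq_iff_eq]
    intro heq
    have := (PySem.Int.floordiv_eq_iff_of_pos hb).mp heq
    have hcomm : I * b = b * I := by ring
    omega
  have e2 : (PySem.List.pyRange (b * I) (b * I + b) 1).filter (fun c => PySem.Int.floordiv c b == I) =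
      PySem.List.pyRange (b * I) (b * I + b) 1 := by
    rw [List.filter_eq_self]
    intro c hc
    obtain ⟨hc0, hcI⟩ := PySem.List.mem_pyRange_one.mp hc
    simp only [beq_iff_eq]
    refine (PySem.Int.floordiv_eq_iff_of_pos hb).mpr ⟨?_, ?_⟩
    · have hcomm : I * b = b * I := by ring
      omega
    · have hcomm : (I + 1) * b = b * I + b := by ring
      omega
  have e3 : (PySem.List.pyRange (b * I + b) s 1).filter (fun c => PySem.Int.floordiv c b == I) = [] := by
    rw [List.filter_eq_nil_iff]
    intro c hc
    obtain ⟨hc0, hcI⟩ := PySem.List.mem_pyRange_one.mp hc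
    simp only [beq_iff_eq]
    intro heq
    have := (PySem.Int.floordiv_eq_iff_of_pos hb).mp heq
    have hcomm : (I + 1) * b = b * I + b := by ring
    omega
  rw [e1, e2, e3]
  simp

theorem pv_flatMap_nil {α β : Type} (l : List α) : l.flatMap (fun _ => ([] : List β)) = [] := by simp

-- the cells routed to bucket t = J*d+I are exactly block (J,I), in scan (row-major) order
theorem pv_filter_block (s b d J I t : Int) (hb : 0 < b) (hs : s = b * d)
    (hJ0 : 0 ≤ J) (hJd : J < d) (hI0 : 0 ≤ I) (hId : I < d) (ht : t = J * d + I) :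
    (PySem.List.pyRange 0 (s * s) 1).filter (fun k =>
        PySem.Int.floordiv (PySem.Int.floordiv k s) b * d + PySem.Int.floordiv (PySem.Int.mod k s) b == t) =
      (PySem.List.pyRange (b * J) (b * J + b) 1).flatMap
        (fun r => (PySem.List.pyRange (b * I) (b * I + b) 1).map (fun c => r * s + c)) := by
  have hd0 : 0 < d := by omega
  have hs0 : 0 < s := by nlinarith
  rw [pv_grid_decomp s (by omega), List.filter_flatMap]
  have hrow : ∀ r ∈ PySem.List.pyRange 0 s 1,
      List.filter (fun k =>
          PySem.Int.floordiv (PySem.Int.floordiv k s) b * d + PySem.Int.floordiv (PySem.Int.mod k s) b == t)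
        ((PySem.List.pyRange 0 s 1).map (fun c => r * s + c)) =
        (if PySem.Int.floordiv r b = J then (PySem.List.pyRange (b * I) (b * I + b) 1).map (fun c => r * s + c) else []) := by
    intro r hr
    obtain ⟨hr0, hrs⟩ := PySem.List.mem_pyRange_one.mp hr
    rw [List.filter_map]
    have hpred : ∀ c ∈ PySem.List.pyRange 0 s 1,
        ((fun k => PySem.Int.floordiv (PySem.Int.floordiv k s) b * d + PySem.Int.floordiv (PySem.Int.mod k s) b == t) ∘
          (fun c => r * s + c)) c =
        ((PySem.Int.floordiv r b == J) && (PySem.Int.floordiv c b == I)) := by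
      intro c hc
      obtain ⟨hc0, hcs⟩ := PySem.List.mem_pyRange_one.mp hc
      obtain ⟨hdiv, hmod⟩ := pv_div_row s r c hs0 hc0 hcs
      simp only [Function.comp_apply, hdiv, hmod]
      rw [Bool.eq_iff_iff]
      simp only [beq_iff_eq, Bool.and_eq_true]
      constructor
      · intro h
        have hrb0 : 0 ≤ PySem.Int.floordiv r b := by
          rw [PySem.Int.le_floordiv_iff_mul_le hb]; omega
        have hrbd : PySem.Int.floordiv r b < d := by
          rw [PySem.Int.floordiv_lt_iff_lt_mul hb]
          have : d * b = b * d := by ring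
          omega
        have hcb0 : 0 ≤ PySem.Int.floordiv c b := by
          rw [PySem.Int.le_floordiv_iff_mul_le hb]; omega
        have hcbd : PySem.Int.floordiv c b < d := by
          rw [PySem.Int.floordiv_lt_iff_lt_mul hb]
          have : d * b = b * d := by ring
          omega
        exact pv_qd_unique hI0 hId hcb0 hcbd (by omega)
      · rintro ⟨h1, h2⟩
        rw [h1, h2, ht]
    rw [List.filter_congr hpred]
    by_cases hrJ : PySem.Int.floordiv r b = J
    · rw [if_pos hrJ]
      have : ∀ c ∈ PySem.List.pyRange 0 s 1,
          ((PySem.Int.floordiv r b == J) && (PySem.Int.floordiv c b == I)) = (PySem.Int.floordiv c b == I) := by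
        intro c _; simp [hrJ]
      rw [List.filter_congr this, pv_filter_interval s b d I hb hI0 hId hs]
    · rw [if_neg hrJ]
      have : (PySem.List.pyRange 0 s 1).filter
          (fun c => ((PySem.Int.floordiv r b == J) && (PySem.Int.floordiv c b == I))) = [] := by
        rw [List.filter_eq_nil_iff]
        intro c _
        simp [hrJ]
      rw [this]
      simp
  rw [List.flatMap_congr hrow]
  have hbJ0 : (0 : Int) ≤ b * J := by positivity
  have hbJs : b * J + b ≤ s := by nlinarith
  rw [PySem.List.pyRange_one_append 0 (b * J) s hbJ0 (by omega),
      PySem.List.pyRange_one_append (b * J) (b * J + b) s (by omega) hbJs,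
      List.flatMap_append, List.flatMap_append]
  have e1 : (PySem.List.pyRange 0 (b * J) 1).flatMap (fun r =>
      if PySem.Int.floordiv r b = J then (PySem.List.pyRange (b * I) (b * I + b) 1).map (fun c => r * s + c) else []) = [] := by
    rw [List.flatMap_congr (g := fun _ => ([] : List Int)) ?_, pv_flatMap_nil]
    intro r hr
    obtain ⟨hr0, hrJ⟩ := PySem.List.mem_pyRange_one.mp hr
    rw [if_neg]
    intro heq
    have := (PySem.Int.floordiv_eq_iff_of_pos hb).mp heq
    have hcomm : J * b = b * J := by ring
    omega
  have e3 : (PySem.List.pyRange (b * J + b) s 1).flatMap (fun r =>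
      if PySem.Int.floordiv r b = J then (PySem.List.pyRange (b * I) (b * I + b) 1).map (fun c => r * s + c) else []) = [] := by
    rw [List.flatMap_congr (g := fun _ => ([] : List Int)) ?_, pv_flatMap_nil]
    intro r hr
    obtain ⟨hr0, hrJ⟩ := PySem.List.mem_pyRange_one.mp hr
    rw [if_neg]
    intro heq
    have := (PySem.Int.floordiv_eq_iff_of_pos hb).mp heq
    have hcomm : (J + 1) * b = b * J + b := by ring
    omega
  have e2 : (PySem.List.pyRange (b * J) (b * J + b) 1).flatMap (fun r =>
      if PySem.Int.floordiv r b = J then (PySem.List.pyRange (b * I) (b * I + b) 1).map (fun c => r * s + c) else []) =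
      (PySem.List.pyRange (b * J) (b * J + b) 1).flatMap (fun r =>
        (PySem.List.pyRange (b * I) (b * I + b) 1).map (fun c => r * s + c)) := by
    apply List.flatMap_congr
    intro r hr
    obtain ⟨hr0, hrJ⟩ := PySem.List.mem_pyRange_one.mp hr
    rw [if_pos]
    refine (PySem.Int.floordiv_eq_iff_of_pos hb).mpr ⟨?_, ?_⟩
    · have hcomm : J * b = b * J := by ring
      omega
    · have hcomm : (J + 1) * b = b * J + b := by ring
      omega
  rw [e1, e2, e3]
  simp

-- the index list of block (t//d, t%d)
def pvBlockIdx (s b d t : Int) : List Int :=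
  (PySem.List.pyRange (b * PySem.Int.floordiv t d) (b * PySem.Int.floordiv t d + b) 1).flatMap
    (fun r => (PySem.List.pyRange (b * PySem.Int.mod t d) (b * PySem.Int.mod t d + b) 1).map (fun c => r * s + c))

-- B's bucket pass, evaluated: bucket t holds exactly block (t//d, t%d) of the grid
theorem pv_gather_eq (grid : List String) (s b : Int) (hb : 0 < b)
    (hdvd : PySem.Int.mod s b = 0) (hs0 : 0 ≤ s) :
    pvGather grid s b =
      (PySem.List.pyRange 0 (PySem.Int.floordiv s b * PySem.Int.floordiv s b) 1).map (fun t =>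
        pvW (fun k => PySem.List.pyGetD grid k "") (pvBlockIdx s b (PySem.Int.floordiv s b) t)) := by
  set d := PySem.Int.floordiv s b with hd
  have hd0 : 0 ≤ d := by
    rw [hd, PySem.Int.le_floordiv_iff_mul_le hb]; omega
  have hsbd : s = b * d := by
    have h := PySem.Int.floordiv_mul_add_mod s b
    rw [hdvd, add_zero] at h
    rw [← hd] at h
    linarith [mul_comm d b]
  simp only [pvGather, ← hd]
  apply List.ext_getElem
  · rw [pv_bucket_len (fun k => PySem.Int.floordiv (PySem.Int.floordiv k s) b * d + PySem.Int.floordiv (PySem.Int.mod k s) b)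
        (fun k => PySem.List.pyGetD grid k "")]
    simp [PySem.List.length_pyRange_one]
  · intro n h1 h2
    have hlenL : ((PySem.List.pyRange 0 (s * s) 1).foldl (fun buckets k =>
        PySem.List.pySetD buckets (PySem.Int.floordiv (PySem.Int.floordiv k s) b * d + PySem.Int.floordiv (PySem.Int.mod k s) b)
          (PySem.List.pyGetD buckets (PySem.Int.floordiv (PySem.Int.floordiv k s) b * d + PySem.Int.floordiv (PySem.Int.mod k s) b) "" ++
            PySem.List.pyGetD grid k "")) (List.replicate (d * d).toNat "")).length = (d * d).toNat := by
      rw [pv_bucket_len (fun k => PySem.Int.floordiv (PySem.Int.floordiv k s) b * d + PySem.Int.floordiv (PySem.Int.mod k s) b)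
          (fun k => PySem.List.pyGetD grid k "")]
      simp
    have hn : n < (d * d).toNat := by rw [hlenL] at h1; exact h1
    have hdd : 0 < d := by
      by_contra hc
      have : d = 0 := by omega
      rw [this] at hn; simp at hn
    rw [← List.getD_eq_getElem _ "" h1]
    rw [pv_bucket_get (fun k => PySem.Int.floordiv (PySem.Int.floordiv k s) b * d + PySem.Int.floordiv (PySem.Int.mod k s) b)
        (fun k => PySem.List.pyGetD grid k "") _ _ n (by simp [hn]) ?hF]
    case hF =>
      intro k hk
      obtain ⟨hk0, hks⟩ := PySem.List.mem_pyRange_one.mp hk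
      have hs1 : 0 < s := by nlinarith
      have ha : 0 ≤ PySem.Int.floordiv (PySem.Int.floordiv k s) b := by
        rw [PySem.Int.le_floordiv_iff_mul_le hb]
        rw [show (0:Int) * b = 0 by ring, PySem.Int.le_floordiv_iff_mul_le hs1]
        omega
      have hm : 0 ≤ PySem.Int.floordiv (PySem.Int.mod k s) b := by
        rw [PySem.Int.le_floordiv_iff_mul_le hb]
        have := PySem.Int.mod_nonneg k hs1
        omega
      positivity
    rw [List.getD_replicate _ hn, String.empty_append]
    rw [List.getElem_map, PySem.List.getElem_pyRange_one, zero_add]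
    set J := PySem.Int.floordiv ((n : Nat) : Int) d with hJ
    set I := PySem.Int.mod ((n : Nat) : Int) d with hI
    have hJ0 : 0 ≤ J := by rw [hJ, PySem.Int.le_floordiv_iff_mul_le hdd]; omega
    have hJd : J < d := by
      rw [hJ, PySem.Int.floordiv_lt_iff_lt_mul hdd]
      have hdd2 : (0:Int) ≤ d * d := by positivity
      rw [← Int.toNat_of_nonneg hdd2]
      exact_mod_cast hn
    have hI0 : 0 ≤ I := PySem.Int.mod_nonneg _ hdd
    have hId : I < d := PySem.Int.mod_lt _ hdd
    have ht : ((n : Nat) : Int) = J * d + I := (PySem.Int.floordiv_mul_add_mod _ _).symm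
    rw [pv_filter_block s b d J I ((n : Nat) : Int) hb hsbd hJ0 hJd hI0 hId ht]
    rw [pvBlockIdx, ← hJ, ← hI]

-- ===== VERDICT helper: turn A's nested loops into the bucket picture =====

-- A's nested loops as a map over bucket numbers
theorem pv_a_map (d : Int) (hd : 0 ≤ d) (f : Int → Int → String) :
    (PySem.List.pyRange 0 d 1).flatMap (fun j => (PySem.List.pyRange 0 d 1).map (fun i => f j i)) =
      (PySem.List.pyRange 0 (d * d) 1).map (fun t => f (PySem.Int.floordiv t d) (PySem.Int.mod t d)) := by
  by_cases hd0 : d = 0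
  · subst hd0
    rw [PySem.List.pyRange_one_eq_nil le_rfl, PySem.List.pyRange_one_eq_nil (by norm_num)]
    rfl
  · have hd1 : 0 < d := by omega
    rw [pv_grid_decomp d (by omega), List.map_flatMap]
    apply List.flatMap_congr
    intro j hj
    rw [List.map_map]
    apply List.map_congr_left
    intro i hi
    obtain ⟨hi0, hid⟩ := PySem.List.mem_pyRange_one.mp hi
    obtain ⟨hdiv, hmod⟩ := pv_div_row d j i hd1 hi0 hid
    simp [hdiv, hmod]

theorem pv_pyRange2 (a : Int) : PySem.List.pyRange a (a + 2) 1 = [a, a + 1] := by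
  rw [PySem.List.pyRange_one_cons (by omega), PySem.List.pyRange_one_cons (by omega),
      PySem.List.pyRange_one_eq_nil (by omega)]

theorem pv_pyRange3 (a : Int) : PySem.List.pyRange a (a + 3) 1 = [a, a + 1, a + 2] := by
  rw [PySem.List.pyRange_one_cons (by omega), PySem.List.pyRange_one_cons (by omega),
      PySem.List.pyRange_one_cons (by omega), PySem.List.pyRange_one_eq_nil (by omega)]
  norm_num
  omega

-- ===== VERDICT (by name: the statement is the Claim_ definition above) =====
theorem split_subgrids_spec : Claim_equal_split_subgrids := by
  unfold Claim_equal_split_subgrids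
  intro grid _hdom
  unfold Spec_split_subgrids
  have hn : (0 : Int) ≤ (grid.length : Int) := by positivity
  obtain ⟨h0s, h1s, h2s⟩ := pv_sizeLoop_char (grid.length : Int) grid.length 0 (by omega) le_rfl (by omega)
  simp only [split_subgrids, split_subgrids_alt, pv_isqrt_eq _ hn]
  set s := sizeLoopB (grid.length : Int) 0 with hsdef
  split_ifs with hc2 hc3
  · -- even branch
    rw [pv_gather_eq grid s 2 (by omega) hc2 h0s]
    set d := PySem.Int.floordiv s 2 with hd
    simp only [PySem.List.foldl_append_singleton_eq_map, PySem.List.foldl_append_eq_flatMap,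
               List.nil_append]
    rw [pv_a_map d (by rw [hd, PySem.Int.le_floordiv_iff_mul_le (by omega)]; omega)]
    apply List.map_congr_left
    intro t ht
    obtain ⟨ht0, htd⟩ := PySem.List.mem_pyRange_one.mp ht
    set J := PySem.Int.floordiv t d with hJ
    set I := PySem.Int.mod t d with hI
    rw [pvBlockIdx, ← hJ, ← hI]
    rw [pv_pyRange2 (2 * J), pv_pyRange2 (2 * I)]
    simp only [List.flatMap_cons, List.flatMap_nil, List.map_cons, List.map_nil, List.append_nil,
               List.cons_append, List.nil_append, pvW, String.append_empty]
    have e2 : 2 * J * s + (2 * I + 1) = 2 * J * s + 2 * I + 1 := by ring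
    have e3 : (2 * J + 1) * s + 2 * I = 2 * J * s + 2 * I + s := by ring
    have e4 : (2 * J + 1) * s + (2 * I + 1) = 2 * J * s + 2 * I + s + 1 := by ring
    rw [e2, e3, e4]
    simp only [String.append_assoc]
    ring_nf
  · -- multiple-of-3 branch
    rw [pv_gather_eq grid s 3 (by omega) hc3 h0s]
    set d := PySem.Int.floordiv s 3 with hd
    simp only [PySem.List.foldl_append_singleton_eq_map, PySem.List.foldl_append_eq_flatMap,
               List.nil_append]
    rw [pv_a_map d (by rw [hd, PySem.Int.le_floordiv_iff_mul_le (by omega)]; omega)]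
    apply List.map_congr_left
    intro t ht
    obtain ⟨ht0, htd⟩ := PySem.List.mem_pyRange_one.mp ht
    set J := PySem.Int.floordiv t d with hJ
    set I := PySem.Int.mod t d with hI
    rw [pvBlockIdx, ← hJ, ← hI]
    rw [pv_pyRange3 (3 * J), pv_pyRange3 (3 * I)]
    simp only [List.flatMap_cons, List.flatMap_nil, List.map_cons, List.map_nil, List.append_nil,
               List.cons_append, List.nil_append, pvW, String.append_empty]
    have e2 : 3 * J * s + (3 * I + 1) = 3 * J * s + 3 * I + 1 := by ring
    have e3 : 3 * J * s + (3 * I + 2) = 3 * J * s + 3 * I + 2 := by ring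
    have e4 : (3 * J + 1) * s + 3 * I = 3 * J * s + 3 * I + s := by ring
    have e5 : (3 * J + 1) * s + (3 * I + 1) = 3 * J * s + 3 * I + s + 1 := by ring
    have e6 : (3 * J + 1) * s + (3 * I + 2) = 3 * J * s + 3 * I + s + 2 := by ring
    have e7 : (3 * J + 2) * s + 3 * I = 3 * J * s + 3 * I + 2 * s := by ring
    have e8 : (3 * J + 2) * s + (3 * I + 1) = 3 * J * s + 3 * I + 2 * s + 1 := by ring
    have e9 : (3 * J + 2) * s + (3 * I + 2) = 3 * J * s + 3 * I + 2 * s + 2 := by ring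
    rw [e2, e3, e4, e5, e6, e7, e8, e9]
    simp only [String.append_assoc]
    ring_nf
  · rfl
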